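-- pv_equiv track=rewrite | github.com/ephrem-ketachew/data-structure-and-algorithms | balanced-xor---bit.py | maxBalancedSubarray
-- ===== SOURCE A (Python) =====
-- from typing import List
--
-- def maxBalancedSubarray(nums: List[int]) -> int:
--     # seen = defaultdict(list)
--     # seen[0].append(-1)
--     # xor = 0
--     # max_len = 0
--     # prefix_odds = [0] * (len(nums) + 1)
--     # for i in range(len(nums)):
--     #     prefix_odds[i + 1] = prefix_odds[i]
--     #     if nums[i] % 2:
--     #         prefix_odds[i + 1] += 1
--
--     # for idx, num in enumerate(nums):
--     #     xor ^= num
--     #     if xor in seen: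
--     #         for i in seen[xor]:
--     #             prev_idx = i + 1
--     #             odds = prefix_odds[idx + 1] - prefix_odds[prev_idx]
--     #             evens = idx + 1 - prev_idx - odds
--     #             if odds == evens:
--     #                 max_len = max(max_len, odds + evens)
--
--     #     seen[xor].append(idx)
--
--     # return max_len
--
--     balance = 0
--     xor = 0
--     seen = {}
--     max_len = 0
--
--     seen[(0, 0)] = -1
--
--     for i in range(len(nums)):
--         xor ^= nums[i]
--         if nums[i] % 2:
--             balance += 1
--         else:
--             balance -= 1
--
--         state = (xor, balance)
--         if state in seen:
--             max_len = max(max_len, i - seen[state])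
--         else:
--             seen[state] = i
--
--     return max_len
-- ===== SOURCE B (Python) =====
-- from typing import List
--
-- def maxBalancedSubarray(nums: List[int]) -> int:
--     n = len(nums)
--     max_len = 0
--     for l in range(n):
--         xor = 0
--         odds = 0
--         evens = 0
--         for r in range(l, n):
--             xor ^= nums[r]
--             if nums[r] % 2:
--                 odds += 1
--             else:
--                 evens += 1
--             if xor == 0 and odds == evens:
--                 max_len = max(max_len, r - l + 1)
--     return max_len
-- ===== Notes on version B (the rewrite author's own statement) =====
-- stated objective: alternative
-- what changed: A's single pass with a first-occurrence hashmap of prefix (xor, parity-balance) states is replaced by two nested loops that, for each start index l, rescan forward maintaining the running xor and odd/even counts and take the max window length with xor 0 and equal counts.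
import Mathlib
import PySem

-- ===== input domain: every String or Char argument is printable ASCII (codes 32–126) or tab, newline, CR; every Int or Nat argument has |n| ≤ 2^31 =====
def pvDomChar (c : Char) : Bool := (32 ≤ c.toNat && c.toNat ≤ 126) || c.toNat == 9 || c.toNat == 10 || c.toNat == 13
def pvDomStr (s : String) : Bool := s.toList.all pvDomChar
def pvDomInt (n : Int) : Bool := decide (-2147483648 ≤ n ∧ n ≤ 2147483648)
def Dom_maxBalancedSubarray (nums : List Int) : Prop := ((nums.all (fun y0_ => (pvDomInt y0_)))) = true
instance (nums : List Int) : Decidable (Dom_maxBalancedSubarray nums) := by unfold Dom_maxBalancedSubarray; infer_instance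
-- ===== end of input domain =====

-- B replaces A's single pass with a first-occurrence hashmap of prefix (xor, balance) states by
-- two nested scans over all start indices (objective: alternative — a structurally different
-- algorithm; B is quadratic where A is linear, no speed claim).

-- ===== PORT A =====
-- one step of A's loop: state = (xor, balance, seen, max_len), input = (i, nums[i])
def stepA (st : Int × Int × PySem.Dict (Int × Int) Int × Int) (p : Int × Int) :
    Int × Int × PySem.Dict (Int × Int) Int × Int :=
  let xor := PySem.Int.bxor st.1 p.2
  let balance := if PySem.Int.mod p.2 2 ≠ 0 then st.2.1 + 1 else st.2.1 - 1
  match (st.2.2.1).get? (xor, balance) with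
  | some j => (xor, balance, st.2.2.1, max st.2.2.2 (p.1 - j))
  | none => (xor, balance, (st.2.2.1).insert (xor, balance) p.1, st.2.2.2)

def maxBalancedSubarray (nums : List Int) : Int :=
  ((PySem.List.enumerate nums).foldl stepA
    (0, 0, (PySem.Dict.empty : PySem.Dict (Int × Int) Int).insert (0, 0) (-1), 0)).2.2.2

-- ===== PORT B =====
-- one step of B's inner loop at start index l: state = (xor, odds, evens, max_len)
def stepB (nums : List Int) (l : Int) (st : Int × Int × Int × Int) (r : Int) :
    Int × Int × Int × Int :=
  let v := PySem.List.pyGetD nums r 0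
  let xor := PySem.Int.bxor st.1 v
  let oe := if PySem.Int.mod v 2 ≠ 0 then (st.2.1 + 1, st.2.2.1) else (st.2.1, st.2.2.1 + 1)
  let m := if xor = 0 ∧ oe.1 = oe.2 then max st.2.2.2 (r - l + 1) else st.2.2.2
  (xor, oe.1, oe.2, m)

def maxBalancedSubarray_alt (nums : List Int) : Int :=
  (PySem.List.pyRange 0 nums.length).foldl
    (fun maxLen l =>
      ((PySem.List.pyRange l nums.length).foldl (stepB nums l) (0, 0, 0, maxLen)).2.2.2) 0

-- ===== PRECONDITION & SPEC =====
def Spec_maxBalancedSubarray (nums : List Int) (out : Int) : Prop := out = maxBalancedSubarray_alt nums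
instance (nums : List Int) (out : Int) : Decidable (Spec_maxBalancedSubarray nums out) := by unfold Spec_maxBalancedSubarray; infer_instance

-- ===== CLAIM (what is proved, stated in full; the proofs are below) =====
def Claim_equal_maxBalancedSubarray : Prop := ∀ (nums : List Int), Dom_maxBalancedSubarray nums → Spec_maxBalancedSubarray nums (maxBalancedSubarray nums)

-- ===== LEMMAS AND PROOFS =====

-- PySem.Int.bxor in ofNat/negSucc normal form, associativity and cancellation (not in the prelude)
theorem bxor_ofNat_ofNat (m n : Nat) :
    PySem.Int.bxor (Int.ofNat m) (Int.ofNat n) = Int.ofNat (m ^^^ n) := by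
  simp [PySem.Int.bxor]

theorem bxor_ofNat_negSucc (m n : Nat) :
    PySem.Int.bxor (Int.ofNat m) (Int.negSucc n) = Int.negSucc (m ^^^ n) := by
  have h : ¬ (0 : Int) ≤ Int.negSucc n := of_decide_eq_false rfl
  simp only [PySem.Int.bxor, Int.ofNat_eq_natCast, Int.natCast_nonneg, if_pos, if_neg h]
  have h2 : (-(Int.negSucc n) - 1) = (n : Int) := by rw [Int.negSucc_eq]; ring
  rw [h2]
  simp [Int.negSucc_eq]; ring

theorem bxor_negSucc_ofNat (m n : Nat) :
    PySem.Int.bxor (Int.negSucc m) (Int.ofNat n) = Int.negSucc (m ^^^ n) := by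
  have h : ¬ (0 : Int) ≤ Int.negSucc m := of_decide_eq_false rfl
  simp only [PySem.Int.bxor, Int.ofNat_eq_natCast, Int.natCast_nonneg, if_pos, if_neg h]
  have h2 : (-(Int.negSucc m) - 1) = (m : Int) := by rw [Int.negSucc_eq]; ring
  rw [h2]
  simp [Int.negSucc_eq]; ring

theorem bxor_negSucc_negSucc (m n : Nat) :
    PySem.Int.bxor (Int.negSucc m) (Int.negSucc n) = Int.ofNat (m ^^^ n) := by
  have hm : ¬ (0 : Int) ≤ Int.negSucc m := of_decide_eq_false rfl
  have hn : ¬ (0 : Int) ≤ Int.negSucc n := of_decide_eq_false rfl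
  simp only [PySem.Int.bxor, if_neg hm, if_neg hn]
  have h1 : (-(Int.negSucc m) - 1) = (m : Int) := by rw [Int.negSucc_eq]; ring
  have h2 : (-(Int.negSucc n) - 1) = (n : Int) := by rw [Int.negSucc_eq]; ring
  rw [h1, h2]; simp

theorem bxor_assoc (a b c : Int) :
    PySem.Int.bxor (PySem.Int.bxor a b) c = PySem.Int.bxor a (PySem.Int.bxor b c) := by
  rcases a with m | m <;> rcases b with n | n <;> rcases c with k | k <;>
    simp only [bxor_ofNat_ofNat, bxor_ofNat_negSucc, bxor_negSucc_ofNat,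
      bxor_negSucc_negSucc, Nat.xor_assoc]

theorem bxor_cancel_left (a x : Int) : PySem.Int.bxor a (PySem.Int.bxor a x) = x := by
  rw [← bxor_assoc, PySem.Int.bxor_self, PySem.Int.bxor_comm, PySem.Int.bxor_zero]

theorem bxor_eq_self_iff (a x : Int) : PySem.Int.bxor a x = a ↔ x = 0 := by
  constructor
  · intro h
    have h2 := congrArg (PySem.Int.bxor a) h
    rw [bxor_cancel_left, PySem.Int.bxor_self] at h2
    exact h2
  · rintro rfl; exact PySem.Int.bxor_zero a

-- prefix state: xor and odd/even balance of the first k elements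
def pstep (s : Int × Int) (v : Int) : Int × Int :=
  (PySem.Int.bxor s.1 v, if PySem.Int.mod v 2 ≠ 0 then s.2 + 1 else s.2 - 1)

def pref (nums : List Int) (k : Nat) : Int × Int := (nums.take k).foldl pstep (0, 0)

theorem pref_zero (nums : List Int) : pref nums 0 = (0, 0) := rfl

theorem pref_succ (nums : List Int) (k : Nat) (h : k < nums.length) :
    pref nums (k + 1) = pstep (pref nums k) nums[k] := by
  unfold pref
  rw [List.take_add_one, List.getElem?_eq_getElem h]
  simp only [Option.toList_some, List.foldl_append, List.foldl_cons, List.foldl_nil]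

-- a valid window: nums[l..r] has xor 0 and equally many odd and even elements
def Valid (nums : List Int) (l r : Nat) : Prop :=
  l ≤ r ∧ r < nums.length ∧ pref nums l = pref nums (r + 1)

-- what both programs' running maximum satisfies once every window with right end r < i is seen
def MInv (nums : List Int) (i : Nat) (m : Int) : Prop :=
  0 ≤ m ∧ (m = 0 ∨ ∃ l r, r < i ∧ Valid nums l r ∧ m = (r : Int) + 1 - l) ∧
  (∀ l r, r < i → Valid nums l r → (r : Int) + 1 - l ≤ m)

theorem MInv_unique (nums : List Int) (i : Nat) (m m' : Int)
    (h : MInv nums i m) (h' : MInv nums i m') : m = m' := by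
  obtain ⟨h0, hat, hub⟩ := h
  obtain ⟨h0', hat', hub'⟩ := h'
  have le1 : m ≤ m' := by
    rcases hat with rfl | ⟨l, r, hr, hv, rfl⟩
    · exact h0'
    · exact hub' l r hr hv
  have le2 : m' ≤ m := by
    rcases hat' with rfl | ⟨l, r, hr, hv, rfl⟩
    · exact h0
    · exact hub l r hr hv
  omega

-- ===== A-side: loop invariant =====
def InvA (nums : List Int) (i : Nat) (st : Int × Int × PySem.Dict (Int × Int) Int × Int) : Prop :=
  st.1 = (pref nums i).1 ∧ st.2.1 = (pref nums i).2 ∧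
  (∀ s : Int × Int, (st.2.2.1).get? s =
      ((List.range (i + 1)).find? (fun k => decide (pref nums k = s))).map (fun k => (k : Int) - 1)) ∧
  MInv nums i st.2.2.2

theorem invA_init (nums : List Int) :
    InvA nums 0 (0, 0, (PySem.Dict.empty : PySem.Dict (Int × Int) Int).insert (0, 0) (-1), 0) := by
  refine ⟨rfl, rfl, ?_, le_refl 0, Or.inl rfl,
    fun l r hr _ => absurd hr (Nat.not_lt_zero r)⟩
  intro s
  rw [PySem.Dict.get?_insert]
  by_cases hs : s = ((0 : Int), (0 : Int))
  · subst hs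
    rw [if_pos rfl]
    simp [List.range_one, pref]
  · have hs' : ¬ (pref nums 0 = s) := by rw [pref_zero]; exact fun h => hs h.symm
    rw [if_neg hs, PySem.Dict.get?_empty]
    simp [List.range_one, List.find?, hs']

theorem invA_step (nums : List Int) (i : Nat) (x b m : Int)
    (seen : PySem.Dict (Int × Int) Int)
    (hi : i < nums.length) (h : InvA nums i (x, b, seen, m)) :
    InvA nums (i + 1) (stepA (x, b, seen, m) ((i : Int), nums[i])) := by
  obtain ⟨hx, hb, hseen, hm⟩ := h
  simp only at hx hb hseen hm
  subst hx hb
  have hps : pref nums (i + 1) = pstep (pref nums i) nums[i] := pref_succ nums i hi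
  have hsx : PySem.Int.bxor (pref nums i).1 nums[i] = (pref nums (i + 1)).1 := by
    rw [hps]; rfl
  have hsb : (if PySem.Int.mod nums[i] 2 ≠ 0 then (pref nums i).2 + 1 else (pref nums i).2 - 1)
      = (pref nums (i + 1)).2 := by
    rw [hps]; rfl
  have hrange : List.range (i + 1 + 1) = List.range (i + 1) ++ [i + 1] := List.range_succ
  rcases hfind : (List.range (i + 1)).find? (fun k => decide (pref nums k = pref nums (i + 1)))
      with _ | k0
  · -- miss: the state is new, it is inserted with value i, max_len unchanged
    have hget : seen.get? (pref nums (i + 1)) = none := by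
      rw [hseen, hfind]; rfl
    have hstep : stepA ((pref nums i).1, (pref nums i).2, seen, m) ((i : Int), nums[i]) =
        ((pref nums (i + 1)).1, (pref nums (i + 1)).2,
          seen.insert (pref nums (i + 1)) (i : Int), m) := by
      simp only [stepA, hsx, hsb, Prod.mk.eta, hget]
    rw [hstep]
    refine ⟨rfl, rfl, ?_, ?_⟩
    · intro s
      simp only
      rw [PySem.Dict.get?_insert]
      by_cases hs : s = pref nums (i + 1)
      · subst hs
        rw [if_pos rfl, hrange, List.find?_append, hfind]
        simp
      · rw [if_neg hs, hseen s, hrange, List.find?_append]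
        have hd : decide (pref nums (i + 1) = s) = false :=
          decide_eq_false (fun h => hs h.symm)
        have hnone : (List.find? (fun k => decide (pref nums k = s)) [i + 1]) = none := by
          simp [List.find?, hd]
        rw [hnone]
        rcases (List.range (i + 1)).find? (fun k => decide (pref nums k = s)) with _ | k <;> rfl
    · obtain ⟨h0, hat, hub⟩ := hm
      refine ⟨h0, ?_, ?_⟩
      · rcases hat with rfl | ⟨l, r, hr, hv, rfl⟩
        · exact Or.inl rfl
        · exact Or.inr ⟨l, r, by omega, hv, rfl⟩
      · intro l r hr hv
        rcases Nat.lt_succ_iff_lt_or_eq.mp hr with hr' | rfl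
        · exact hub l r hr' hv
        · exfalso
          obtain ⟨hlr, _, hpe⟩ := hv
          have hmem : l ∈ List.range (r + 1) := List.mem_range.mpr (by omega)
          have h2 := List.find?_eq_none.mp hfind l hmem
          simp at h2
          exact h2 hpe
  · -- hit: k0 is the first index with this prefix state
    have hget : seen.get? (pref nums (i + 1)) = some ((k0 : Int) - 1) := by
      rw [hseen, hfind]; rfl
    have hstep : stepA ((pref nums i).1, (pref nums i).2, seen, m) ((i : Int), nums[i]) =
        ((pref nums (i + 1)).1, (pref nums (i + 1)).2, seen,
          max m ((i : Int) - ((k0 : Int) - 1))) := by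
      simp only [stepA, hsx, hsb, Prod.mk.eta, hget]
    rw [hstep]
    have hfs := List.find?_eq_some_iff_getElem.mp hfind
    have hk0p : pref nums k0 = pref nums (i + 1) := by simpa using hfs.1
    have hk0le : k0 ≤ i := by
      obtain ⟨j, hj, hje, _⟩ := hfs.2
      simp at hj hje; omega
    have hk0min : ∀ j < k0, pref nums j ≠ pref nums (i + 1) := by
      obtain ⟨j, hj, hje, hmin⟩ := hfs.2
      intro j' hj' hpe
      have hje' : j = k0 := by simpa using hje
      subst hje'
      have h2 := hmin j' (by simpa using hj')
      simp at h2
      exact h2 hpe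
    refine ⟨rfl, rfl, ?_, ?_⟩
    · intro s
      simp only
      rw [hseen s, hrange, List.find?_append]
      by_cases hs : pref nums (i + 1) = s
      · subst hs
        rw [hfind]; rfl
      · have hd : decide (pref nums (i + 1) = s) = false := decide_eq_false hs
        have hnone : (List.find? (fun k => decide (pref nums k = s)) [i + 1]) = none := by
          simp [List.find?, hd]
        rw [hnone]
        rcases (List.range (i + 1)).find? (fun k => decide (pref nums k = s)) with _ | k <;> rfl
    · obtain ⟨h0, hat, hub⟩ := hm
      have hcand : ((i : Int) - ((k0 : Int) - 1)) = (i : Int) + 1 - k0 := by ring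
      have hvK : Valid nums k0 i := ⟨hk0le, hi, hk0p⟩
      refine ⟨le_trans h0 (le_max_left _ _), ?_, ?_⟩
      · rcases le_or_gt ((i : Int) - ((k0 : Int) - 1)) m with hle | hgt
        · rw [max_eq_left hle]
          rcases hat with rfl | ⟨l, r, hr, hv, rfl⟩
          · exact Or.inl rfl
          · exact Or.inr ⟨l, r, by omega, hv, rfl⟩
        · rw [max_eq_right (le_of_lt hgt)]
          exact Or.inr ⟨k0, i, by omega, hvK, by rw [hcand]⟩
      · intro l r hr hv
        rcases Nat.lt_succ_iff_lt_or_eq.mp hr with hr' | rfl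
        · exact le_trans (hub l r hr' hv) (le_max_left _ _)
        · obtain ⟨hlr, _, hpe⟩ := hv
          have hk0l : k0 ≤ l := by
            by_contra hlt
            exact hk0min l (by omega) hpe
          have hle2 : (r : Int) + 1 - l ≤ (r : Int) - ((k0 : Int) - 1) := by
            have hc : (k0 : Int) ≤ l := by exact_mod_cast hk0l
            omega
          exact le_trans hle2 (le_max_right _ _)

theorem foldA (nums : List Int) :
    ∀ (ys : List Int) (i : Nat) st, nums.drop i = ys → InvA nums i st →
      InvA nums (i + ys.length) ((PySem.List.enumerate ys (i : Int)).foldl stepA st) := by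
  intro ys
  induction ys with
  | nil => intro i st _ h; simpa [PySem.List.enumerate_nil] using h
  | cons y ys ih =>
    intro i st hdrop h
    have hi : i < nums.length := by
      by_contra hge
      rw [List.drop_eq_nil_of_le (by omega)] at hdrop
      exact List.cons_ne_nil y ys hdrop.symm
    have hy : nums[i] = y := by
      have h2 : (nums.drop i)[0]? = nums[i + 0]? := List.getElem?_drop
      rw [hdrop, List.getElem?_cons_zero] at h2
      have h3 : nums[i + 0]? = some nums[i] := by simp [List.getElem?_eq_getElem hi]
      rw [h3] at h2
      exact Option.some_inj.mp h2.symm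
    have hdrop' : nums.drop (i + 1) = ys := by
      have h2 := congrArg List.tail hdrop
      simp only [List.tail_cons] at h2
      rwa [List.tail_drop] at h2
    rw [PySem.List.enumerate_cons]
    simp only [List.foldl_cons]
    have hcast : ((i : Int) + 1) = ((i + 1 : Nat) : Int) := by push_cast; ring
    rw [hcast]
    obtain ⟨x, b, seen, m⟩ := st
    have hst' : InvA nums (i + 1) (stepA (x, b, seen, m) ((i : Int), y)) := by
      rw [← hy]; exact invA_step nums i x b m seen hi h
    have h2 := ih (i + 1) (stepA (x, b, seen, m) ((i : Int), y)) hdrop' hst'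
    have heq : i + 1 + ys.length = i + (ys.length + 1) := by omega
    rw [heq] at h2
    exact h2

theorem A_isBest (nums : List Int) : MInv nums nums.length (maxBalancedSubarray nums) := by
  have h := foldA nums nums 0 _ rfl (invA_init nums)
  simp only [Nat.zero_add, Nat.cast_zero] at h
  exact h.2.2.2

-- ===== B-side: loop invariants =====

-- inner loop at start l: state after scanning nums[l .. l+k-1]
def InvB (nums : List Int) (l k : Nat) (m0 : Int) (st : Int × Int × Int × Int) : Prop :=
  (pref nums (l + k)).1 = PySem.Int.bxor (pref nums l).1 st.1 ∧
  (pref nums (l + k)).2 = (pref nums l).2 + (st.2.1 - st.2.2.1) ∧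
  st.2.1 + st.2.2.1 = (k : Int) ∧
  m0 ≤ st.2.2.2 ∧
  (st.2.2.2 = m0 ∨ ∃ j, j < k ∧ Valid nums l (l + j) ∧ st.2.2.2 = (j : Int) + 1) ∧
  (∀ j, j < k → Valid nums l (l + j) → (j : Int) + 1 ≤ st.2.2.2)

-- the max_len update of B's inner loop, given that its test means "window [l, l+k] is valid"
theorem invB_max_part (nums : List Int) (l k : Nat) (m0 m : Int) (cond : Prop)
    [inst : Decidable cond] (hiff : cond ↔ Valid nums l (l + k))
    (hm0 : m0 ≤ m)
    (hat : m = m0 ∨ ∃ j, j < k ∧ Valid nums l (l + j) ∧ m = (j : Int) + 1)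
    (hub : ∀ j, j < k → Valid nums l (l + j) → (j : Int) + 1 ≤ m) :
    m0 ≤ (if cond then max m ((k : Int) + 1) else m) ∧
    ((if cond then max m ((k : Int) + 1) else m) = m0 ∨
      ∃ j, j < k + 1 ∧ Valid nums l (l + j) ∧
        (if cond then max m ((k : Int) + 1) else m) = (j : Int) + 1) ∧
    (∀ j, j < k + 1 → Valid nums l (l + j) →
      (j : Int) + 1 ≤ (if cond then max m ((k : Int) + 1) else m)) := by
  refine ⟨?_, ?_, ?_⟩
  · split_ifs with hc
    · exact le_trans hm0 (le_max_left _ _)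
    · exact hm0
  · split_ifs with hc
    · rcases le_or_gt ((k : Int) + 1) m with hle | hgt
      · rw [max_eq_left hle]
        rcases hat with rfl | ⟨j, hj, hvj, rfl⟩
        · exact Or.inl rfl
        · exact Or.inr ⟨j, by omega, hvj, rfl⟩
      · rw [max_eq_right (le_of_lt hgt)]
        exact Or.inr ⟨k, by omega, hiff.mp hc, rfl⟩
    · rcases hat with rfl | ⟨j, hj, hvj, rfl⟩
      · exact Or.inl rfl
      · exact Or.inr ⟨j, by omega, hvj, rfl⟩
  · intro j hj hvj
    rcases Nat.lt_succ_iff_lt_or_eq.mp hj with hj' | rfl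
    · have hle := hub j hj' hvj
      split_ifs with hc
      · exact le_trans hle (le_max_left _ _)
      · exact hle
    · rw [if_pos (hiff.mpr hvj)]
      exact le_max_right _ _

theorem invB_step (nums : List Int) (l k : Nat) (m0 X O E m : Int)
    (hk : l + k < nums.length) (h : InvB nums l k m0 (X, O, E, m)) :
    InvB nums l (k + 1) m0 (stepB nums l (X, O, E, m) ((l + k : Nat) : Int)) := by
  obtain ⟨hX, hOE, hcnt, hm0, hat, hub⟩ := h
  simp only at hX hOE hcnt hm0 hat hub
  have hv : PySem.List.pyGetD nums ((l + k : Nat) : Int) 0 = nums[l + k] := by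
    rw [PySem.List.pyGetD_natCast, List.getD_eq_getElem _ _ hk]
  have hps : pref nums (l + k + 1) = pstep (pref nums (l + k)) nums[l + k] :=
    pref_succ nums (l + k) hk
  have hidx : l + (k + 1) = l + k + 1 := by omega
  have hlen : (((l + k : Nat) : Int) - ((l : Nat) : Int) + 1) = (k : Int) + 1 := by
    push_cast; ring
  have hX' : (pref nums (l + (k + 1))).1
      = PySem.Int.bxor (pref nums l).1 (PySem.Int.bxor X nums[l + k]) := by
    rw [hidx, hps]
    show PySem.Int.bxor (pref nums (l + k)).1 nums[l + k] = _
    rw [hX, bxor_assoc]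
  by_cases hpar : PySem.Int.mod nums[l + k] 2 ≠ 0
  · -- odd element
    have hOE' : (pref nums (l + (k + 1))).2 = (pref nums l).2 + ((O + 1) - E) := by
      rw [hidx, hps]
      show (if PySem.Int.mod nums[l + k] 2 ≠ 0
          then (pref nums (l + k)).2 + 1 else (pref nums (l + k)).2 - 1) = _
      rw [if_pos hpar, hOE]; ring
    have hstep : stepB nums l (X, O, E, m) ((l + k : Nat) : Int) =
        (PySem.Int.bxor X nums[l + k], O + 1, E,
          if PySem.Int.bxor X nums[l + k] = 0 ∧ O + 1 = E
          then max m ((k : Int) + 1) else m) := by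
      simp only [stepB, hv, if_pos hpar]
      rw [hlen]
    rw [hstep]
    have hiff : (PySem.Int.bxor X nums[l + k] = 0 ∧ O + 1 = E) ↔ Valid nums l (l + k) := by
      constructor
      · rintro ⟨hz, hoe⟩
        refine ⟨by omega, hk, ?_⟩
        have h1 : (pref nums (l + (k + 1))).1 = (pref nums l).1 := by
          rw [hX', hz, PySem.Int.bxor_zero]
        have h2 : (pref nums (l + (k + 1))).2 = (pref nums l).2 := by rw [hOE']; omega
        rw [← hidx]
        exact (Prod.ext_iff.mpr ⟨h1.symm, h2.symm⟩)
      · rintro ⟨_, _, hpe⟩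
        rw [← hidx] at hpe
        constructor
        · have h1 := congrArg Prod.fst hpe
          rw [hX'] at h1
          exact (bxor_eq_self_iff _ _).mp h1.symm
        · have h2 := congrArg Prod.snd hpe
          rw [hOE'] at h2
          omega
    have h3 := invB_max_part nums l k m0 m _ hiff hm0 hat hub
    exact ⟨hX', hOE', by push_cast; omega, h3.1, h3.2.1, h3.2.2⟩
  · -- even element
    have hOE' : (pref nums (l + (k + 1))).2 = (pref nums l).2 + (O - (E + 1)) := by
      rw [hidx, hps]
      show (if PySem.Int.mod nums[l + k] 2 ≠ 0
          then (pref nums (l + k)).2 + 1 else (pref nums (l + k)).2 - 1) = _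
      rw [if_neg hpar, hOE]; ring
    have hstep : stepB nums l (X, O, E, m) ((l + k : Nat) : Int) =
        (PySem.Int.bxor X nums[l + k], O, E + 1,
          if PySem.Int.bxor X nums[l + k] = 0 ∧ O = E + 1
          then max m ((k : Int) + 1) else m) := by
      simp only [stepB, hv, if_neg hpar]
      rw [hlen]
    rw [hstep]
    have hiff : (PySem.Int.bxor X nums[l + k] = 0 ∧ O = E + 1) ↔ Valid nums l (l + k) := by
      constructor
      · rintro ⟨hz, hoe⟩
        refine ⟨by omega, hk, ?_⟩
        have h1 : (pref nums (l + (k + 1))).1 = (pref nums l).1 := by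
          rw [hX', hz, PySem.Int.bxor_zero]
        have h2 : (pref nums (l + (k + 1))).2 = (pref nums l).2 := by rw [hOE']; omega
        rw [← hidx]
        exact (Prod.ext_iff.mpr ⟨h1.symm, h2.symm⟩)
      · rintro ⟨_, _, hpe⟩
        rw [← hidx] at hpe
        constructor
        · have h1 := congrArg Prod.fst hpe
          rw [hX'] at h1
          exact (bxor_eq_self_iff _ _).mp h1.symm
        · have h2 := congrArg Prod.snd hpe
          rw [hOE'] at h2
          omega
    have h3 := invB_max_part nums l k m0 m _ hiff hm0 hat hub
    exact ⟨hX', hOE', by push_cast; omega, h3.1, h3.2.1, h3.2.2⟩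

theorem foldB_inner (nums : List Int) (l : Nat) :
    ∀ (c k : Nat) (st : Int × Int × Int × Int) (m0 : Int), l + k + c = nums.length →
      InvB nums l k m0 st →
      InvB nums l (k + c) m0
        ((PySem.List.pyRange ((l + k : Nat) : Int) (nums.length : Int)).foldl
          (stepB nums ((l : Nat) : Int)) st) := by
  intro c
  induction c with
  | zero =>
    intro k st m0 hlen h
    have he : ((l + k : Nat) : Int) = (nums.length : Int) := by omega
    rw [he]
    simpa [PySem.List.pyRange] using h
  | succ c ih =>
    intro k st m0 hlen h
    have hk : l + k < nums.length := by omega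
    have hlt : ((l + k : Nat) : Int) < (nums.length : Int) := by exact_mod_cast hk
    rw [PySem.List.pyRange_one_cons hlt]
    simp only [List.foldl_cons]
    obtain ⟨X, O, E, m⟩ := st
    have hstep := invB_step nums l k m0 X O E m hk h
    have hcast : ((l + k : Nat) : Int) + 1 = ((l + (k + 1) : Nat) : Int) := by push_cast; ring
    rw [hcast]
    have h2 := ih (k + 1) _ m0 (by omega) hstep
    have heq : k + 1 + c = k + (c + 1) := by omega
    rw [heq] at h2
    exact h2

-- outer loop: every window starting at l < t has been accounted for
def OInv (nums : List Int) (t : Nat) (m : Int) : Prop :=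
  0 ≤ m ∧ (m = 0 ∨ ∃ l r, r < nums.length ∧ Valid nums l r ∧ m = (r : Int) + 1 - l) ∧
  (∀ l r, l < t → Valid nums l r → (r : Int) + 1 - l ≤ m)

theorem foldB_outer (nums : List Int) :
    ∀ (c t : Nat) (m : Int), t + c = nums.length → OInv nums t m →
      OInv nums (t + c)
        ((PySem.List.pyRange ((t : Nat) : Int) (nums.length : Int)).foldl
          (fun maxLen l =>
            ((PySem.List.pyRange l nums.length).foldl (stepB nums l) (0, 0, 0, maxLen)).2.2.2) m) := by
  intro c
  induction c with
  | zero =>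
    intro t m hlen h
    have he : ((t : Nat) : Int) = (nums.length : Int) := by omega
    rw [he]
    simpa [PySem.List.pyRange] using h
  | succ c ih =>
    intro t m hlen h
    obtain ⟨h0, hat, hub⟩ := h
    have ht : t < nums.length := by omega
    have hlt : ((t : Nat) : Int) < (nums.length : Int) := by exact_mod_cast ht
    rw [PySem.List.pyRange_one_cons hlt]
    simp only [List.foldl_cons]
    have hinit : InvB nums t 0 m (0, 0, 0, m) := by
      refine ⟨?_, by simp, by simp, le_refl m, Or.inl rfl,
        fun j hj _ => absurd hj (Nat.not_lt_zero j)⟩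
      simp [PySem.Int.bxor_zero]
    have hinner := foldB_inner nums t (nums.length - t) 0 (0, 0, 0, m) m (by omega) hinit
    have ht0 : ((t + 0 : Nat) : Int) = ((t : Nat) : Int) := by norm_num
    rw [ht0] at hinner
    set st' := (PySem.List.pyRange ((t : Nat) : Int) (nums.length : Int)).foldl
        (stepB nums ((t : Nat) : Int)) (0, 0, 0, m) with hst'
    obtain ⟨_, _, _, hm0, hatI, hubI⟩ := hinner
    have hO : OInv nums (t + 1) st'.2.2.2 := by
      refine ⟨le_trans h0 hm0, ?_, ?_⟩
      · rcases hatI with he | ⟨j, hj, hvj, he⟩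
        · rw [he]; exact hat
        · rw [he]
          exact Or.inr ⟨t, t + j, hvj.2.1, hvj, by push_cast; ring⟩
      · intro l r hl hv
        rcases Nat.lt_succ_iff_lt_or_eq.mp hl with hl' | rfl
        · exact le_trans (hub l r hl' hv) hm0
        · have hlr : l ≤ r := hv.1
          have hrn : r < nums.length := hv.2.1
          have hj : r = l + (r - l) := by omega
          have hv' : Valid nums l (l + (r - l)) := by rw [← hj]; exact hv
          have hle := hubI (r - l) (by omega) hv'
          have hc : ((r - l : Nat) : Int) + 1 = (r : Int) + 1 - l := by omega
          rw [hc] at hle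
          exact hle
    have hcast : ((t : Nat) : Int) + 1 = ((t + 1 : Nat) : Int) := by push_cast; ring
    rw [hcast]
    have h2 := ih (t + 1) st'.2.2.2 (by omega) hO
    have heq : t + 1 + c = t + (c + 1) := by omega
    rw [heq] at h2
    exact h2

theorem B_isBest (nums : List Int) : MInv nums nums.length (maxBalancedSubarray_alt nums) := by
  have h := foldB_outer nums nums.length 0 0 (by omega)
    ⟨le_refl 0, Or.inl rfl, fun l r hl _ => absurd hl (Nat.not_lt_zero l)⟩
  simp only [Nat.zero_add, Nat.cast_zero] at h
  obtain ⟨h0, hat, hub⟩ := h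
  refine ⟨h0, ?_, ?_⟩
  · rcases hat with he | ⟨l, r, hr, hv, he⟩
    · exact Or.inl he
    · exact Or.inr ⟨l, r, hr, hv, he⟩
  · intro l r hr hv
    have hlr : l ≤ r := hv.1
    exact hub l r (by omega) hv

-- ===== VERDICT (by name: the statement is the Claim_ definition above) =====
theorem maxBalancedSubarray_spec : Claim_equal_maxBalancedSubarray := by
  intro nums _
  unfold Spec_maxBalancedSubarray
  exact MInv_unique nums nums.length _ _ (A_isBest nums) (B_isBest nums)
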